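-- pv_equiv track=rewrite | github.com/jonnymind/new_divine_comedy | dict_maker.py | find_common_parts
-- ===== SOURCE A (Python) =====
-- def find_common_parts(word1, word2):
--     # Find the longest common substring between the two words
--     m = len(word1)
--     n = len(word2)
--     longest_common = ""
--     for i in range(m):
--         for j in range(n):
--             k = 0
--             while (i + k < m and j + k < n and word1[i + k] == word2[j + k]):
--                 k += 1
--             if k > 2 and len(longest_common) < k:
--                 longest_common = word1[i:i+k]
--
--     # If there is no common substring, return None
--     if longest_common == "":
--         return None
--
--     # Find the non-common parts of the two words
--     non_common1 = word1.split(longest_common)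
--     non_common2 = word2.split(longest_common)
--
--     # Remove any empty strings from the non-common parts lists
--     non_common1 = [part for part in non_common1 if part != ""]
--     non_common2 = [part for part in non_common2 if part != ""]
--
--     # Combine the longest common substring with the non-common parts
--     result = [longest_common] + non_common1 + non_common2
--
--     # Return the result
--     return result
-- ===== SOURCE B (Python) =====
-- def find_common_parts(word1, word2):
--     # O(m*n) DP over match-run lengths, scanned bottom-up right-to-left so that
--     # a ">=" update reproduces A's first-match tie-break; then the same
--     # split-and-filter assembly.
--     m = len(word1)
--     n = len(word2)
--     nxt = [0] * (n + 1)
--     best = ""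
--     for i in reversed(range(m)):
--         cur = [(nxt[j + 1] + 1 if word1[i] == word2[j] else 0) for j in range(n)] + [0]
--         for j in reversed(range(n)):
--             k = cur[j]
--             if k > 2 and k >= len(best):
--                 best = word1[i:i + k]
--         nxt = cur
--     if best == "":
--         return None
--     result = [best]
--     result += [part for part in word1.split(best) if part != ""]
--     result += [part for part in word2.split(best) if part != ""]
--     return result
-- ===== Notes on version B (the rewrite author's own statement) =====
-- stated objective: faster
-- what changed: Replaces the per-pair while-loop rescans with an O(m*n) dynamic-programming table of match-run lengths (one row kept), scanned bottom-up right-to-left with a >= update so the tie-break matches A's first-match rule; the split/assembly stage is unchanged.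
import Mathlib
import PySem

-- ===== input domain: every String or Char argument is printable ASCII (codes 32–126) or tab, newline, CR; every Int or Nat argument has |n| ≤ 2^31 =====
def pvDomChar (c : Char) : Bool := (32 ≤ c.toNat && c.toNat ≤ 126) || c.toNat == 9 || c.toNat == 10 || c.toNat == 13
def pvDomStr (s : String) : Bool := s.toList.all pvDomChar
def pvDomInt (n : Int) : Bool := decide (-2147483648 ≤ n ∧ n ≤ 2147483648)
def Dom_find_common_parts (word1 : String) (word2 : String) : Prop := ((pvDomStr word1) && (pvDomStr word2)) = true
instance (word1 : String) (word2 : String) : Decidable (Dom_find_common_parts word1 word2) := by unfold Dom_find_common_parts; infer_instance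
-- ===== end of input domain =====

set_option maxHeartbeats 1000000

-- B replaces A's per-pair while-loop rescans by a DP of match-run lengths scanned
-- bottom-up right-to-left (same result, including tie-breaks); objective: faster.

-- ===== PORT A =====
-- the inner 'while' loop of A: k += 1 while the characters at i+k / j+k match
def pvRunA (l1 l2 : List Char) (i j k : Int) : Int :=
  if h : i + k < (l1.length : Int) ∧ j + k < (l2.length : Int) ∧
      PySem.List.pyGetD l1 (i + k) ' ' = PySem.List.pyGetD l2 (j + k) ' ' then
    pvRunA l1 l2 i j (k + 1)
  else k
termination_by ((l1.length : Int) - (i + k)).toNat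
decreasing_by omega

def find_common_parts (word1 : String) (word2 : String) : Option (List String) :=
  let l1 := word1.toList
  let l2 := word2.toList
  let m : Int := l1.length
  let n : Int := l2.length
  let longest :=
    (PySem.List.pyRange 0 m 1).foldl (fun lc i =>
      (PySem.List.pyRange 0 n 1).foldl (fun lc j =>
        let k := pvRunA l1 l2 i j 0
        if 2 < k ∧ (lc.length : Int) < k then
          PySem.List.slice l1 (some i) (some (i + k))
        else lc) lc) ([] : List Char)
  if longest = [] then none
  else
    let nc1 := (PySem.Chars.splitOn l1 longest).filter (fun part => part ≠ [])
    let nc2 := (PySem.Chars.splitOn l2 longest).filter (fun part => part ≠ [])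
    some (([longest] ++ nc1 ++ nc2).map (fun cs => String.ofList cs))

-- ===== PORT B =====
def find_common_parts_alt (word1 : String) (word2 : String) : Option (List String) :=
  let l1 := word1.toList
  let l2 := word2.toList
  let m : Int := l1.length
  let n : Int := l2.length
  let st :=
    ((PySem.List.pyRange 0 m 1).reverse).foldl (fun (st : List Int × List Char) i =>
      let nxt := st.1
      let cur :=
        ((PySem.List.pyRange 0 n 1).map (fun j =>
          if PySem.List.pyGetD l1 i ' ' = PySem.List.pyGetD l2 j ' ' then
            PySem.List.pyGetD nxt (j + 1) 0 + 1
          else 0)) ++ [0]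
      let best :=
        ((PySem.List.pyRange 0 n 1).reverse).foldl (fun best j =>
          let k := PySem.List.pyGetD cur j 0
          if 2 < k ∧ (best.length : Int) ≤ k then
            PySem.List.slice l1 (some i) (some (i + k))
          else best) st.2
      (cur, best))
    (List.replicate (n + 1).toNat 0, ([] : List Char))
  let best := st.2
  if best = [] then none
  else
    let nc1 := (PySem.Chars.splitOn l1 best).filter (fun part => part ≠ [])
    let nc2 := (PySem.Chars.splitOn l2 best).filter (fun part => part ≠ [])
    some (([best] ++ nc1 ++ nc2).map (fun cs => String.ofList cs))

-- ===== PRECONDITION & SPEC =====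
def Spec_find_common_parts (word1 : String) (word2 : String) (out : Option (List String)) : Prop := out = find_common_parts_alt word1 word2
instance (word1 : String) (word2 : String) (out : Option (List String)) : Decidable (Spec_find_common_parts word1 word2 out) := by unfold Spec_find_common_parts; infer_instance

-- ===== CLAIM (what is proved, stated in full; the proofs are below) =====
def Claim_equal_find_common_parts : Prop := ∀ (word1 : String) (word2 : String), Dom_find_common_parts word1 word2 → Spec_find_common_parts word1 word2 (find_common_parts word1 word2)

-- ===== LEMMAS AND PROOFS =====

-- length of the common run of the two suffixes
def pvLcp : List Char → List Char → Nat
  | a :: as, b :: bs => if a = b then pvLcp as bs + 1 else 0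
  | _, _ => 0

def pvK (l1 l2 : List Char) (p : Nat × Nat) : Nat := pvLcp (l1.drop p.1) (l2.drop p.2)

def pvSub (l1 l2 : List Char) (p : Nat × Nat) : List Char := (l1.drop p.1).take (pvK l1 l2 p)

def pvStepA (l1 l2 : List Char) (lc : List Char) (p : Nat × Nat) : List Char :=
  if 2 < pvK l1 l2 p ∧ lc.length < pvK l1 l2 p then pvSub l1 l2 p else lc

def pvStepB (l1 l2 : List Char) (lc : List Char) (p : Nat × Nat) : List Char :=
  if 2 < pvK l1 l2 p ∧ lc.length ≤ pvK l1 l2 p then pvSub l1 l2 p else lc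

-- the flattened pair list, in A's iteration order
def pvPairs (m n : Nat) : List (Nat × Nat) :=
  (List.range m).flatMap (fun i => (List.range n).map (Prod.mk i))

theorem pvLcp_nil_left (b : List Char) : pvLcp [] b = 0 := by cases b <;> rfl

theorem pvLcp_nil_right (a : List Char) : pvLcp a [] = 0 := by cases a <;> rfl

theorem pvLcp_le_left (a b : List Char) : pvLcp a b ≤ a.length := by
  induction a generalizing b with
  | nil => cases b <;> simp [pvLcp]
  | cons x xs ih =>
    cases b with
    | nil => simp [pvLcp]
    | cons y ys =>
      simp only [pvLcp]
      split
      · have := ih ys; simp; omega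
      · simp

theorem pvSub_length (l1 l2 : List Char) (p : Nat × Nat) :
    (pvSub l1 l2 p).length = pvK l1 l2 p := by
  have h := pvLcp_le_left (l1.drop p.1) (l2.drop p.2)
  simp [pvSub, pvK] at *
  omega

theorem pvStep_comm (l1 l2 : List Char) (r : List Char) (p q : Nat × Nat) :
    pvStepB l1 l2 (pvStepA l1 l2 r p) q = pvStepA l1 l2 (pvStepB l1 l2 r q) p := by
  simp only [pvStepA, pvStepB]
  have hp := pvSub_length l1 l2 p
  have hq := pvSub_length l1 l2 q
  split_ifs <;> simp_all <;> omega

theorem pvFoldrB_append (l1 l2 : List Char) (ps : List (Nat × Nat)) (p : Nat × Nat) :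
    List.foldr (fun p acc => pvStepB l1 l2 acc p) [] (ps ++ [p]) =
      pvStepA l1 l2 (List.foldr (fun p acc => pvStepB l1 l2 acc p) [] ps) p := by
  induction ps with
  | nil =>
    simp only [List.nil_append, List.foldr_cons, List.foldr_nil, pvStepA, pvStepB]
    have := pvSub_length l1 l2 p
    split_ifs <;> simp_all
  | cons q ps ih =>
    simp only [List.cons_append, List.foldr_cons, ih, pvStep_comm]

theorem pvScan_eq (l1 l2 : List Char) (ps : List (Nat × Nat)) :
    List.foldl (pvStepA l1 l2) [] ps =
      List.foldr (fun p acc => pvStepB l1 l2 acc p) [] ps := by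
  induction ps using List.reverseRecOn with
  | nil => rfl
  | append_singleton ps p ih => rw [List.foldl_append, pvFoldrB_append, ih]; rfl

theorem pvRunA_eq (l1 l2 : List Char) (i j k : Nat) :
    pvRunA l1 l2 i j k = ((k + pvLcp (l1.drop (i + k)) (l2.drop (j + k)) : Nat) : Int) := by
  induction hd : l1.length - (i + k) generalizing k with
  | zero =>
    rw [pvRunA, dif_neg (by omega)]
    have h : l1.drop (i + k) = [] := List.drop_eq_nil_of_le (by omega)
    rw [h, pvLcp_nil_left]
    simp
  | succ d ih =>
    have him : i + k < l1.length := by omega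
    rw [pvRunA]
    by_cases hjn : j + k < l2.length
    · by_cases hch : l1[i + k]'him = l2[j + k]'hjn
      · rw [dif_pos ?hcnd]
        case hcnd =>
          refine ⟨by omega, by omega, ?_⟩
          rw [PySem.List.pyGetD_eq_getElem l1 ' ' (by omega) (by omega),
              PySem.List.pyGetD_eq_getElem l2 ' ' (by omega) (by omega)]
          have e1 : ((i : Int) + (k : Int)).toNat = i + k := by omega
          have e2 : ((j : Int) + (k : Int)).toNat = j + k := by omega
          simp only [e1, e2]
          exact hch
        have harg : (k : Int) + 1 = ((k + 1 : Nat) : Int) := by push_cast; ring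
        rw [harg, ih (k + 1) (by omega)]
        have e3 : i + (k + 1) = i + k + 1 := by omega
        have e4 : j + (k + 1) = j + k + 1 := by omega
        rw [e3, e4]
        have hl : pvLcp (l1.drop (i + k)) (l2.drop (j + k)) =
            pvLcp (l1.drop (i + k + 1)) (l2.drop (j + k + 1)) + 1 := by
          rw [List.drop_eq_getElem_cons him, List.drop_eq_getElem_cons hjn]
          simp [pvLcp, hch]
        rw [hl]
        push_cast
        ring
      · rw [dif_neg ?hneg]
        case hneg =>
          intro ⟨h1, h2, h3⟩
          rw [PySem.List.pyGetD_eq_getElem l1 ' ' (by omega) h1,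
              PySem.List.pyGetD_eq_getElem l2 ' ' (by omega) h2] at h3
          have e1 : ((i : Int) + (k : Int)).toNat = i + k := by omega
          have e2 : ((j : Int) + (k : Int)).toNat = j + k := by omega
          simp only [e1, e2] at h3
          exact hch h3
        rw [List.drop_eq_getElem_cons him, List.drop_eq_getElem_cons hjn]
        simp [pvLcp, hch]
    · rw [dif_neg (by rintro ⟨-, h2, -⟩; omega)]
      have h : l2.drop (j + k) = [] := List.drop_eq_nil_of_le (by omega)
      rw [h, pvLcp_nil_right]
      simp

-- A's port computes the foldl of pvStepA over the pair list
theorem pvA_scan (l1 l2 : List Char) :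
    (PySem.List.pyRange 0 (l1.length : Int) 1).foldl (fun lc i =>
      (PySem.List.pyRange 0 (l2.length : Int) 1).foldl (fun lc j =>
        let k := pvRunA l1 l2 i j 0
        if 2 < k ∧ (lc.length : Int) < k then
          PySem.List.slice l1 (some i) (some (i + k))
        else lc) lc) ([] : List Char) =
    List.foldl (pvStepA l1 l2) [] (pvPairs l1.length l2.length) := by
  unfold pvPairs
  rw [PySem.List.pyRange_zero_natCast l1.length, List.foldl_map, List.foldl_flatMap]
  apply PySem.List.foldl_congr_mem
  intro lc i _
  rw [PySem.List.pyRange_zero_natCast l2.length, List.foldl_map, List.foldl_map]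
  apply PySem.List.foldl_congr_mem
  intro lc j _
  have hk : pvRunA l1 l2 (i : Int) (j : Int) 0 = ((pvK l1 l2 (i, j) : Nat) : Int) := by
    have := pvRunA_eq l1 l2 i j 0
    simpa [pvK] using this
  simp only [hk, PySem.List.slice_natCast_add]
  simp only [pvStepA, pvSub, pvK]
  split_ifs <;> first | rfl | (exfalso; omega)

-- the DP row of run lengths for a fixed position i in word1
def pvRowF (l1 l2 : List Char) (i : Nat) : List Int :=
  (List.range (l2.length + 1)).map (fun j => ((pvLcp (l1.drop i) (l2.drop j) : Nat) : Int))

def pvInnerN (l1 l2 : List Char) (i : Nat) (b : List Char) : List Char :=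
  ((List.range l2.length).reverse).foldl (fun best j => pvStepB l1 l2 best (i, j)) b

def pvOuterN (l1 l2 : List Char) (t : Nat) (b : List Char) : List Char :=
  ((List.range t).reverse).foldl (fun best i => pvInnerN l1 l2 i best) b

theorem pvOuterN_succ (l1 l2 : List Char) (t : Nat) (b : List Char) :
    pvOuterN l1 l2 (t + 1) b = pvOuterN l1 l2 t (pvInnerN l1 l2 t b) := by
  unfold pvOuterN
  rw [List.range_succ]
  simp

-- the freshly built row equals the DP row for index t
theorem pvCur_eq (l1 l2 : List Char) (t : Nat) (ht : t < l1.length) :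
    ((PySem.List.pyRange 0 (l2.length : Int) 1).map (fun j =>
      if PySem.List.pyGetD l1 (t : Int) ' ' = PySem.List.pyGetD l2 j ' ' then
        PySem.List.pyGetD (pvRowF l1 l2 (t + 1)) (j + 1) 0 + 1
      else 0)) ++ [0] = pvRowF l1 l2 t := by
  conv_rhs => rw [pvRowF, List.range_succ, List.map_append]
  rw [PySem.List.pyRange_zero_natCast, List.map_map]
  congr 1
  · apply List.map_congr_left
    intro j hj
    have hj' : j < l2.length := List.mem_range.mp hj
    simp only [Function.comp]
    rw [PySem.List.pyGetD_natCast, PySem.List.pyGetD_natCast,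
        List.getD_eq_getElem l1 ' ' ht, List.getD_eq_getElem l2 ' ' hj']
    have e : ((j : Int) + 1) = ((j + 1 : Nat) : Int) := by push_cast; ring
    rw [e, PySem.List.pyGetD_natCast, pvRowF,
        PySem.List.getD_map_range _ _ _ _ (by omega)]
    rw [List.drop_eq_getElem_cons ht, List.drop_eq_getElem_cons hj']
    simp only [pvLcp]
    split_ifs with hc
    · push_cast; ring
    · rfl
  · have h : l2.drop l2.length = [] := List.drop_length
    simp [h, pvLcp_nil_right]

-- the inner loop of B's port is the per-row pvStepB scan
theorem pvInner_eq (l1 l2 : List Char) (t : Nat) (b : List Char) :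
    ((PySem.List.pyRange 0 (l2.length : Int) 1).reverse).foldl (fun best j =>
      if 2 < PySem.List.pyGetD (pvRowF l1 l2 t) j 0 ∧
          (best.length : Int) ≤ PySem.List.pyGetD (pvRowF l1 l2 t) j 0 then
        PySem.List.slice l1 (some (t : Int))
          (some ((t : Int) + PySem.List.pyGetD (pvRowF l1 l2 t) j 0))
      else best) b = pvInnerN l1 l2 t b := by
  unfold pvInnerN
  rw [PySem.List.pyRange_zero_natCast, ← List.map_reverse, List.foldl_map]
  apply PySem.List.foldl_congr_mem
  intro best j hj
  have hj' : j < l2.length := List.mem_range.mp (List.mem_reverse.mp hj)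
  have hk : PySem.List.pyGetD (pvRowF l1 l2 t) (j : Int) 0 =
      ((pvLcp (l1.drop t) (l2.drop j) : Nat) : Int) := by
    rw [PySem.List.pyGetD_natCast, pvRowF, PySem.List.getD_map_range _ _ _ _ (by omega)]
  simp only [hk, PySem.List.slice_natCast_add]
  simp only [pvStepB, pvSub, pvK]
  split_ifs <;> first | rfl | (exfalso; omega)

-- outer-loop invariant of B's port: the carried row is always pvRowF
theorem pvOuter_inv (l1 l2 : List Char) (t : Nat) (ht : t ≤ l1.length) :
    ∀ b : List Char,
    (((List.range t).reverse.map (fun (i : Nat) => (i : Int))).foldl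
      (fun (st : List Int × List Char) i =>
        let nxt := st.1
        let cur :=
          ((PySem.List.pyRange 0 (l2.length : Int) 1).map (fun j =>
            if PySem.List.pyGetD l1 i ' ' = PySem.List.pyGetD l2 j ' ' then
              PySem.List.pyGetD nxt (j + 1) 0 + 1
            else 0)) ++ [0]
        let best :=
          ((PySem.List.pyRange 0 (l2.length : Int) 1).reverse).foldl (fun best j =>
            let k := PySem.List.pyGetD cur j 0
            if 2 < k ∧ (best.length : Int) ≤ k then
              PySem.List.slice l1 (some i) (some (i + k))
            else best) st.2
        (cur, best))
      (pvRowF l1 l2 t, b)) = (pvRowF l1 l2 0, pvOuterN l1 l2 t b) := by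
  induction t with
  | zero => intro b; simp [pvOuterN]
  | succ t ih =>
    intro b
    rw [List.range_succ, List.reverse_append, List.reverse_singleton,
      List.singleton_append, List.map_cons, List.foldl_cons, pvOuterN_succ]
    refine Eq.trans ?_ (ih (by omega) (pvInnerN l1 l2 t b))
    congr 1
    simp only []
    rw [pvCur_eq l1 l2 t (by omega)]
    rw [pvInner_eq l1 l2 t b]

-- B's port computes the reversed foldl of pvStepB over the pair list
theorem pvB_scan (l1 l2 : List Char) :
    (((PySem.List.pyRange 0 (l1.length : Int) 1).reverse).foldl
      (fun (st : List Int × List Char) i =>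
        let nxt := st.1
        let cur :=
          ((PySem.List.pyRange 0 (l2.length : Int) 1).map (fun j =>
            if PySem.List.pyGetD l1 i ' ' = PySem.List.pyGetD l2 j ' ' then
              PySem.List.pyGetD nxt (j + 1) 0 + 1
            else 0)) ++ [0]
        let best :=
          ((PySem.List.pyRange 0 (l2.length : Int) 1).reverse).foldl (fun best j =>
            let k := PySem.List.pyGetD cur j 0
            if 2 < k ∧ (best.length : Int) ≤ k then
              PySem.List.slice l1 (some i) (some (i + k))
            else best) st.2
        (cur, best))
      (List.replicate ((l2.length : Int) + 1).toNat 0, ([] : List Char))).2 =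
    List.foldl (pvStepB l1 l2) [] (pvPairs l1.length l2.length).reverse := by
  have hinit : (List.replicate ((l2.length : Int) + 1).toNat (0 : Int)) =
      pvRowF l1 l2 l1.length := by
    have e : ((l2.length : Int) + 1).toNat = l2.length + 1 := by omega
    rw [e, pvRowF]
    apply List.ext_getElem
    · simp
    · intro idx h1 h2
      have : l1.drop l1.length = [] := List.drop_length
      simp [this, pvLcp_nil_left]
  rw [PySem.List.pyRange_zero_natCast l1.length, ← List.map_reverse, hinit,
      pvOuter_inv l1 l2 l1.length le_rfl []]
  unfold pvPairs pvOuterN pvInnerN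
  rw [List.reverse_flatMap, List.foldl_flatMap]
  apply PySem.List.foldl_congr_mem
  intro acc i _
  simp only [Function.comp]
  rw [← List.map_reverse, List.foldl_map]

-- ===== VERDICT (by name: the statement is the Claim_ definition above) =====
theorem find_common_parts_spec : Claim_equal_find_common_parts := by
  intro word1 word2 _
  unfold Spec_find_common_parts find_common_parts find_common_parts_alt
  simp only []
  rw [pvA_scan, pvB_scan, pvScan_eq, List.foldl_reverse]
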